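-- pv_equiv track=rewrite | github.com/esceptico/obsidian-vault-mcp | src/headless_obsidian_mcp/transport/formatters.py | _code_fence
-- ===== SOURCE A (Python) =====
-- def _code_fence(value: str) -> str:
--     longest = 0
--     current = 0
--     for char in value:
--         if char == "`":
--             current += 1
--             longest = max(longest, current)
--         else:
--             current = 0
--     return "`" * (longest + 1)
-- ===== SOURCE B (Python) =====
-- def _code_fence(value: str) -> str:
--     n = 1
--     while "`" * n in value:
--         n += 1
--     return "`" * n
-- ===== Notes on version B (the rewrite author's own statement) =====
-- stated objective: simpler
-- what changed: Instead of scanning characters with a running run-length counter and a running maximum, B probes substring containment of ever-longer backtick strings ('`'*n in value) and returns the first fence not contained.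
import Mathlib
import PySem

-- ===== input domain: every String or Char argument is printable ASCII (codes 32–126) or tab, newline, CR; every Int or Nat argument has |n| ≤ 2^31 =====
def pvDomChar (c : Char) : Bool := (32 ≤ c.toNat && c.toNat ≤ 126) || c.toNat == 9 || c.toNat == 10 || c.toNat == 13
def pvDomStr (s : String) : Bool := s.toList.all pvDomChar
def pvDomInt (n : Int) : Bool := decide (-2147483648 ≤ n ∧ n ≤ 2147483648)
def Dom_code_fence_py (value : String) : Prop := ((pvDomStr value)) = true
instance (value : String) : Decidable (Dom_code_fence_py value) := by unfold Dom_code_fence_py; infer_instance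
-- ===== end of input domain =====

-- B replaces A's running run-length counter with substring probes of ever-longer fences; simpler, same result.

-- ===== PORT A =====
-- for char in value: if char == "`": current += 1; longest = max(longest, current) else: current = 0
def code_fence_py (value : String) : String :=
  let st := value.toList.foldl
    (fun (st : Nat × Nat) c =>
      if c = '`' then (max st.1 (st.2 + 1), st.2 + 1) else (st.1, 0))
    (0, 0)
  -- "`" * (longest + 1)
  String.mk (List.replicate (st.1 + 1) '`')

-- ===== PORT B =====
-- while "`" * n in value: n += 1
def codeFenceLoop (cs : List Char) (n : Nat) : Nat :=
  if h : PySem.Chars.isIn (List.replicate n '`') cs = true then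
    codeFenceLoop cs (n + 1)
  else n
termination_by cs.length + 1 - n
decreasing_by
  have hinf := (PySem.Chars.isIn_iff_infix _ _).mp h
  have hle := hinf.length_le
  simp [List.length_replicate] at hle
  omega

def code_fence_py_alt (value : String) : String :=
  String.mk (List.replicate (codeFenceLoop value.toList 1) '`')

-- ===== PRECONDITION & SPEC =====
def Spec_code_fence_py (value : String) (out : String) : Prop := out = code_fence_py_alt value
instance (value : String) (out : String) : Decidable (Spec_code_fence_py value out) := by unfold Spec_code_fence_py; infer_instance

-- ===== CLAIM (what is proved, stated in full; the proofs are below) =====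
def Claim_equal_code_fence_py : Prop := ∀ (value : String), Dom_code_fence_py value → Spec_code_fence_py value (code_fence_py value)

-- ===== LEMMAS AND PROOFS =====

/-- length of the leading backtick run -/
def pvLead : List Char → Nat
  | [] => 0
  | c :: cs => if c = '`' then pvLead cs + 1 else 0

/-- length of the longest backtick run -/
def pvMaxRun : List Char → Nat
  | [] => 0
  | c :: cs => max (pvLead (c :: cs)) (pvMaxRun cs)

theorem pvLead_le_maxRun (cs : List Char) : pvLead cs ≤ pvMaxRun cs := by
  cases cs with
  | nil => simp [pvLead, pvMaxRun]
  | cons c cs => simp [pvMaxRun]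

theorem pvMaxRun_le_cons (c : Char) (cs : List Char) : pvMaxRun cs ≤ pvMaxRun (c :: cs) := by
  simp [pvMaxRun]

theorem foldA_eq (cs : List Char) : ∀ l cur : Nat, cur ≤ l →
    (cs.foldl (fun (st : Nat × Nat) c =>
      if c = '`' then (max st.1 (st.2 + 1), st.2 + 1) else (st.1, 0)) (l, cur)).1
      = max l (max (cur + pvLead cs) (pvMaxRun cs)) := by
  induction cs with
  | nil => intro l cur h; simp [pvLead, pvMaxRun]; omega
  | cons c cs ih =>
    intro l cur h
    by_cases hc : c = '`'
    · subst hc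
      rw [List.foldl_cons, if_pos rfl, ih (max l (cur + 1)) (cur + 1) (le_max_right _ _)]
      have h1 : pvLead ('`' :: cs) = pvLead cs + 1 := by simp [pvLead]
      have h2 : pvMaxRun ('`' :: cs) = max (pvLead cs + 1) (pvMaxRun cs) := by
        simp [pvMaxRun, h1]
      rw [h1, h2]
      omega
    · rw [List.foldl_cons, if_neg hc, ih l 0 (Nat.zero_le _)]
      have h0 := pvLead_le_maxRun cs
      have h1 : pvLead (c :: cs) = 0 := by simp [pvLead, hc]
      have h2 : pvMaxRun (c :: cs) = max 0 (pvMaxRun cs) := by simp [pvMaxRun, h1]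
      rw [h1, h2]
      omega

theorem replicate_prefix_lead (k : Nat) (cs : List Char)
    (h : List.replicate k '`' <+: cs) : k ≤ pvLead cs := by
  induction k generalizing cs with
  | zero => exact Nat.zero_le _
  | succ k ih =>
    cases cs with
    | nil => simp [List.replicate] at h
    | cons c cs =>
      rw [List.replicate_succ, List.cons_prefix_cons] at h
      obtain ⟨rfl, h2⟩ := h
      simp [pvLead]
      exact ih cs h2

theorem lead_prefix (cs : List Char) : List.replicate (pvLead cs) '`' <+: cs := by
  induction cs with
  | nil => simp [pvLead]
  | cons c cs ih =>
    by_cases hc : c = '`'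
    · subst hc
      have h1 : pvLead ('`' :: cs) = pvLead cs + 1 := by simp [pvLead]
      rw [h1, List.replicate_succ]
      exact List.cons_prefix_cons.mpr ⟨rfl, ih⟩
    · simp [pvLead, hc]

theorem replicate_prefix_replicate {a : Char} {k m : Nat} (h : k ≤ m) :
    List.replicate k a <+: List.replicate m a := by
  refine ⟨List.replicate (m - k) a, ?_⟩
  rw [← List.replicate_add]
  congr 1
  omega

theorem replicate_infix_iff (k : Nat) (cs : List Char) :
    List.replicate k '`' <:+: cs ↔ k ≤ pvMaxRun cs := by
  constructor
  · intro h
    induction cs with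
    | nil =>
      have := h.length_le
      simp at this
      simp [pvMaxRun, this]
    | cons c cs ih =>
      rcases (List.infix_cons_iff.mp h) with hp | hi
      · exact le_trans (replicate_prefix_lead k _ hp) (pvLead_le_maxRun _)
      · exact le_trans (ih hi) (pvMaxRun_le_cons c cs)
  · intro h
    induction cs with
    | nil =>
      simp [pvMaxRun] at h
      simp [h]
    | cons c cs ih =>
      rw [show pvMaxRun (c :: cs) = max (pvLead (c :: cs)) (pvMaxRun cs) from by simp [pvMaxRun]] at h
      rcases le_max_iff.mp h with h | h
      · exact ((replicate_prefix_replicate h).trans (lead_prefix (c :: cs))).isInfix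
      · exact List.infix_cons (ih h)

theorem codeFenceLoop_eq (cs : List Char) :
    ∀ k n : Nat, n + k = pvMaxRun cs + 1 → codeFenceLoop cs n = pvMaxRun cs + 1 := by
  intro k
  induction k with
  | zero =>
    intro n hn
    rw [codeFenceLoop]
    rw [dif_neg]
    · omega
    · intro h
      have := (replicate_infix_iff n cs).mp ((PySem.Chars.isIn_iff_infix _ _).mp h)
      omega
  | succ k ih =>
    intro n hn
    rw [codeFenceLoop]
    rw [dif_pos]
    · exact ih (n + 1) (by omega)
    · exact (PySem.Chars.isIn_iff_infix _ _).mpr ((replicate_infix_iff n cs).mpr (by omega))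

-- ===== VERDICT (by name: the statement is the Claim_ definition above) =====
theorem code_fence_py_spec : Claim_equal_code_fence_py := by
  intro value _
  simp only [Spec_code_fence_py, code_fence_py, code_fence_py_alt]
  rw [codeFenceLoop_eq value.toList (pvMaxRun value.toList) 1 (by omega)]
  rw [foldA_eq value.toList 0 0 (le_refl 0)]
  have := pvLead_le_maxRun value.toList
  congr 2
  omega
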